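-- pv_equiv track=rewrite | github.com/chrisaschris/Algorithm | 프로그래머스/2/42626. 더 맵게/더 맵게.py | solution
-- ===== SOURCE A (Python) =====
-- from heapq import heapify, heappush, heappop
--
-- def solution(scoville, K):
--     answer = 0
--     heapify(scoville)
--     while scoville and scoville[0]<K:
--         if len(scoville)==1:
--             answer = -1
--             break
--         heappush(scoville,heappop(scoville)+heappop(scoville)*2)
--         answer+=1
--     return answer
-- ===== SOURCE B (Python) =====
-- def solution(scoville, K):
--     # Sorted-list strategy instead of a binary heap: keep scoville sorted in place,
--     # pop the two smallest from the front, reinsert the mix at its sorted position.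
--     # NOTE: like the original, this mutates scoville; final list contents differ
--     # from the heap version (only the return value is equivalent).
--     scoville.sort()
--     answer = 0
--     while scoville and scoville[0] < K:
--         if len(scoville) == 1:
--             return -1
--         a = scoville.pop(0)
--         b = scoville.pop(0)
--         mixed = a + 2 * b
--         i = 0
--         while i < len(scoville) and scoville[i] <= mixed:
--             i += 1
--         scoville.insert(i, mixed)
--         answer += 1
--     return answer
-- ===== Notes on version B (the rewrite author's own statement) =====
-- stated objective: alternative
-- what changed: Replaces the binary heap (heapify/heappop/heappush sift operations) by a sorted list kept in order: sort once, pop the two smallest from the front, and reinsert the mix at its sorted position by linear insertion.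
import Mathlib
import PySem

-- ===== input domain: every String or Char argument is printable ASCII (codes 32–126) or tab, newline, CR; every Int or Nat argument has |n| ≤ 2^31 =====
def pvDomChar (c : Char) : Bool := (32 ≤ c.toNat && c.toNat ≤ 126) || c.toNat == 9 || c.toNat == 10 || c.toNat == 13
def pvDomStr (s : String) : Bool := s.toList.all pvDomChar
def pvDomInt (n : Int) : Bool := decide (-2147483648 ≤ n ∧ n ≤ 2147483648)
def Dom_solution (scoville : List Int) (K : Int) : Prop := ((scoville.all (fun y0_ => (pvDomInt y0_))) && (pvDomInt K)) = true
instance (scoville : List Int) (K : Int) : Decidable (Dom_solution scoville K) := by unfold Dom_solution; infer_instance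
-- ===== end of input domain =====

-- B replaces A's binary heap by a sorted list (sort once, pop two smallest from the
-- front, linear-insert the mix back); like A it mutates the Python argument in place,
-- and the equivalence proved here is about the RETURN value only.

-- ===== PORT A =====
-- heapq._siftdown(heap, startpos, pos): newitem bubbles up towards startpos.
-- The loop is encoded with a structural counter: each step moves to the parent
-- index, so `pos` iterations always suffice and the counter never runs out.
def pvSiftdownGo : Nat → List Int → Nat → Nat → Int → List Int
  | 0, heap, _startpos, pos, newitem => heap.set pos newitem
  | fuel + 1, heap, startpos, pos, newitem =>
    if startpos < pos then
      let parentpos := (pos - 1) / 2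
      let parent := heap.getD parentpos 0
      if newitem < parent then pvSiftdownGo fuel (heap.set pos parent) startpos parentpos newitem
      else heap.set pos newitem
    else heap.set pos newitem

def pvSiftdown (heap : List Int) (startpos pos : Nat) (newitem : Int) : List Int :=
  pvSiftdownGo pos heap startpos pos newitem

-- the while-loop of heapq._siftup plus its trailing _siftdown call; the hole
-- index grows every step, so `endpos` iterations always suffice
def pvSiftupGo : Nat → List Int → Nat → Nat → Nat → Int → List Int
  | 0, heap, _endpos, startpos, pos, newitem =>
    pvSiftdown (heap.set pos newitem) startpos pos newitem
  | fuel + 1, heap, endpos, startpos, pos, newitem =>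
    if 2 * pos + 1 < endpos then
      let childpos := 2 * pos + 1
      let rightpos := childpos + 1
      let childpos :=
        if rightpos < endpos ∧ ¬ (heap.getD childpos 0 < heap.getD rightpos 0) then rightpos
        else childpos
      pvSiftupGo fuel (heap.set pos (heap.getD childpos 0)) endpos startpos childpos newitem
    else pvSiftdown (heap.set pos newitem) startpos pos newitem

-- heapq._siftup(heap, pos)
def pvSiftup (heap : List Int) (pos : Nat) : List Int :=
  pvSiftupGo heap.length heap heap.length pos pos (heap.getD pos 0)

-- heapify's loop: for i in reversed(range(n//2)): _siftup(heap, i)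
def pvHeapifyGo (heap : List Int) : Nat → List Int
  | 0 => heap
  | i + 1 => pvHeapifyGo (pvSiftup heap i) i

def pvHeapify (heap : List Int) : List Int := pvHeapifyGo heap (heap.length / 2)

-- heapq.heappop: lastelt = heap.pop(); if heap: return heap[0] after heap[0]=lastelt; _siftup(heap,0)
def pvHeappop (heap : List Int) : Int × List Int :=
  let lastelt := heap.getLastD 0
  let rest := heap.dropLast
  if rest.isEmpty then (lastelt, rest)
  else (rest.getD 0 0, pvSiftup (rest.set 0 lastelt) 0)

-- heapq.heappush: heap.append(item); _siftdown(heap, 0, len(heap)-1)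
def pvHeappush (heap : List Int) (item : Int) : List Int :=
  pvSiftdown (heap ++ [item]) 0 heap.length item

-- the while-loop of A; each pass shrinks the heap by one, so len(scoville)
-- iterations always suffice for the structural counter
def pvLoopAGo : Nat → List Int → Int → Int → Int
  | 0, _heap, _K, answer => answer
  | fuel + 1, heap, K, answer =>
    if heap ≠ [] then
      if heap.getD 0 0 < K then
        if heap.length == 1 then -1
        else
          let p1 := pvHeappop heap
          let p2 := pvHeappop p1.2
          pvLoopAGo fuel (pvHeappush p2.2 (p1.1 + p2.1 * 2)) K (answer + 1)
      else answer
    else answer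

def solution (scoville : List Int) (K : Int) : Int :=
  pvLoopAGo (pvHeapify scoville).length (pvHeapify scoville) K 0

-- ===== PORT B =====
-- the inner insertion loop of Source B: insert v after every element ≤ v
def pvInsertSorted (xs : List Int) (v : Int) : List Int :=
  match xs with
  | [] => [v]
  | x :: t => if x ≤ v then x :: pvInsertSorted t v else v :: x :: t

-- the while-loop of B over the sorted list; each pass shrinks it by one
def pvLoopBGo : Nat → List Int → Int → Int → Int
  | 0, _s, _K, answer => answer
  | fuel + 1, s, K, answer =>
    match s with
    | [] => answer
    | a :: rest =>
      if a < K then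
        match rest with
        | [] => -1
        | b :: t => pvLoopBGo fuel (pvInsertSorted t (a + 2 * b)) K (answer + 1)
      else answer

def solution_alt (scoville : List Int) (K : Int) : Int :=
  pvLoopBGo (PySem.List.sorted scoville (fun x => x) false).length
    (PySem.List.sorted scoville (fun x => x) false) K 0

-- ===== PRECONDITION & SPEC =====
def Spec_solution (scoville : List Int) (K : Int) (out : Int) : Prop := out = solution_alt scoville K
instance (scoville : List Int) (K : Int) (out : Int) : Decidable (Spec_solution scoville K out) := by unfold Spec_solution; infer_instance

-- ===== CLAIM (what is proved, stated in full; the proofs are below) =====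
def Claim_equal_solution : Prop := ∀ (scoville : List Int) (K : Int), Dom_solution scoville K → Spec_solution scoville K (solution scoville K)

-- ===== LEMMAS AND PROOFS =====

theorem pvSiftdownGo_length : ∀ (fuel : Nat) (heap : List Int) (s p : Nat) (x : Int),
    (pvSiftdownGo fuel heap s p x).length = heap.length := by
  intro fuel
  induction fuel with
  | zero => intro heap s p x; simp [pvSiftdownGo]
  | succ f ih =>
    intro heap s p x
    simp only [pvSiftdownGo]
    split_ifs <;> simp [ih]

theorem pvSiftdown_length (heap : List Int) (startpos pos : Nat) (newitem : Int) :
    (pvSiftdown heap startpos pos newitem).length = heap.length :=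
  pvSiftdownGo_length pos heap startpos pos newitem

theorem pvSiftupGo_length : ∀ (fuel : Nat) (heap : List Int) (e s p : Nat) (x : Int),
    (pvSiftupGo fuel heap e s p x).length = heap.length := by
  intro fuel
  induction fuel with
  | zero => intro heap e s p x; simp [pvSiftupGo, pvSiftdown_length]
  | succ f ih =>
    intro heap e s p x
    simp only [pvSiftupGo]
    split_ifs <;> simp [ih, pvSiftdown_length]

theorem pvSiftup_length (heap : List Int) (pos : Nat) :
    (pvSiftup heap pos).length = heap.length := by
  simp [pvSiftup, pvSiftupGo_length]

theorem pvHeappop_length (heap : List Int) :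
    (pvHeappop heap).2.length = heap.length - 1 := by
  unfold pvHeappop
  dsimp only
  split <;> simp [pvSiftup_length]

theorem pvHeappush_length (heap : List Int) (item : Int) :
    (pvHeappush heap item).length = heap.length + 1 := by
  simp [pvHeappush, pvSiftdown_length]

-- heap edges whose parent index is >= k all hold
def pvHeapFrom (l : List Int) (k : Nat) : Prop :=
  ∀ j : Nat, 0 < j → j < l.length → k ≤ (j - 1) / 2 →
    l.getD ((j - 1) / 2) 0 ≤ l.getD j 0

-- pos lies in the subtree rooted at P (parent-chain ancestor)
inductive pvAnc : Nat → Nat → Prop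
  | refl (P : Nat) : pvAnc P P
  | step (P pos : Nat) : P < pos → pvAnc P ((pos - 1) / 2) → pvAnc P pos

theorem pvAnc_le {P pos : Nat} (h : pvAnc P pos) : P ≤ pos := by
  induction h with
  | refl => exact le_refl _
  | step => omega

theorem pvAnc_self (P : Nat) : pvAnc P P := pvAnc.refl P

theorem pvAnc_zero (pos : Nat) : pvAnc 0 pos := by
  induction pos using Nat.strong_induction_on with
  | _ pos ih =>
    rcases Nat.eq_zero_or_pos pos with h | h
    · subst h; exact pvAnc.refl 0
    · exact pvAnc.step _ _ h (ih _ (by omega))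

theorem pv_getD_set_self (l : List Int) (i : Nat) (a : Int) (h : i < l.length) :
    (l.set i a).getD i 0 = a := by
  simp [List.getD, h]

theorem pv_getD_set_ne (l : List Int) (i j : Nat) (a : Int) (h : i ≠ j) :
    (l.set i a).getD j 0 = l.getD j 0 := by
  simp [List.getD, h]

theorem pv_set_getD_self (l : List Int) (i : Nat) (h : i < l.length) :
    l.set i (l.getD i 0) = l := by
  rw [List.getD_eq_getElem l 0 h]; exact List.set_getElem_self h

-- the multiset swap: writing l[j] into slot i and then v into slot j permutes to writing v into slot i
theorem pv_set_swap_perm (l : List Int) (i j : Nat) (v : Int)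
    (hi : i < l.length) (hj : j < l.length) (hij : i ≠ j) :
    ((l.set i (l.getD j 0)).set j v).Perm (l.set i v) := by
  rw [List.perm_iff_count]
  intro b
  have hj1 : j < (l.set i (l.getD j 0)).length := by simpa using hj
  rw [List.count_set hj1, List.count_set hi, List.count_set hi]
  have hji : (l.set i (l.getD j 0))[j]'hj1 = l[j]'hj := List.getElem_set_ne hij hj1
  have hgd : l.getD j 0 = l[j]'hj := List.getD_eq_getElem l 0 hj
  rw [hji, hgd]
  split_ifs <;> omega

theorem pv_set_append_length (l : List Int) (a b : Int) :
    (l ++ [a]).set l.length b = l ++ [b] := by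
  induction l with
  | nil => rfl
  | cons x t ih => simp only [List.cons_append, List.length_cons, List.set_cons_succ, ih]

theorem pv_dropLast_append_getLastD :
    ∀ (l : List Int) (d : Int), l ≠ [] → l.dropLast ++ [l.getLastD d] = l := by
  intro l
  induction l with
  | nil => intro d h; exact absurd rfl h
  | cons x t ih =>
    intro d _
    cases t with
    | nil => simp
    | cons y u =>
      have := ih x (by simp)
      simpa using congrArg (x :: ·) this

-- the root of a heap is a lower bound on every slot
theorem pvHeapFrom_root_le (l : List Int) (h : pvHeapFrom l 0) :
    ∀ j : Nat, j < l.length → l.getD 0 0 ≤ l.getD j 0 := by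
  intro j
  induction j using Nat.strong_induction_on with
  | _ j ih =>
    intro hj
    rcases Nat.eq_zero_or_pos j with h0 | h0
    · subst h0; exact le_refl _
    · have hedge := h j h0 hj (Nat.zero_le _)
      have hlt : (j - 1) / 2 < j := by omega
      exact le_trans (ih _ hlt (lt_trans hlt hj)) hedge

theorem pvSiftdownGo_spec : ∀ (fuel : Nat) (l : List Int) (P pos : Nat) (x : Int),
    pos ≤ fuel → pos < l.length → pvAnc P pos →
    (∀ j : Nat, 0 < j → j < l.length → P ≤ (j - 1) / 2 → j ≠ pos →
      (l.set pos x).getD ((j - 1) / 2) 0 ≤ (l.set pos x).getD j 0) →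
    (P < pos → ∀ c : Nat, 0 < c → c < l.length → (c - 1) / 2 = pos →
      l.getD ((pos - 1) / 2) 0 ≤ l.getD c 0) →
    (pvSiftdownGo fuel l P pos x).Perm (l.set pos x) ∧
      pvHeapFrom (pvSiftdownGo fuel l P pos x) P := by
  intro fuel
  induction fuel with
  | zero =>
    intro l P pos x hfuel hpos hanc hinv hG
    have hpos0 : pos = 0 := by omega
    have hP0 : P = 0 := by have := pvAnc_le hanc; omega
    refine ⟨List.Perm.refl _, ?_⟩
    intro j hj0 hjlen hPj
    have hjl : j < l.length := by simpa [pvSiftdownGo] using hjlen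
    exact hinv j hj0 hjl hPj (by omega)
  | succ f ih =>
    intro l P pos x hfuel hpos hanc hinv hG
    have hf1 : ∀ k, k ≠ pos → (l.set pos x).getD k 0 = l.getD k 0 :=
      fun k hk => pv_getD_set_ne l pos k x (Ne.symm hk)
    simp only [pvSiftdownGo]
    by_cases hPp : P < pos
    · rw [if_pos hPp]
      by_cases hlt : x < l.getD ((pos - 1) / 2) 0
      · rw [if_pos hlt]
        have hppos : 0 < pos := by omega
        have hpplt : (pos - 1) / 2 < pos := by omega
        have hpplen : (pos - 1) / 2 < l.length := lt_trans hpplt hpos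
        have hanc' : pvAnc P ((pos - 1) / 2) := by
          cases hanc with
          | refl => omega
          | step => assumption
        have he2 : ((l.set pos (l.getD ((pos - 1) / 2) 0)).set ((pos - 1) / 2) x).getD ((pos - 1) / 2) 0 = x :=
          pv_getD_set_self _ _ x (by simpa using hpplen)
        have he3 : ((l.set pos (l.getD ((pos - 1) / 2) 0)).set ((pos - 1) / 2) x).getD pos 0 = l.getD ((pos - 1) / 2) 0 := by
          rw [pv_getD_set_ne _ _ _ _ (by omega)]
          exact pv_getD_set_self l pos _ hpos
        have he1 : ∀ k, k ≠ (pos - 1) / 2 → k ≠ pos →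
            ((l.set pos (l.getD ((pos - 1) / 2) 0)).set ((pos - 1) / 2) x).getD k 0 = l.getD k 0 := by
          intro k h1 h2
          rw [pv_getD_set_ne _ _ _ _ (Ne.symm h1), pv_getD_set_ne _ _ _ _ (Ne.symm h2)]
        have hinv2 : ∀ j : Nat, 0 < j → j < (l.set pos (l.getD ((pos - 1) / 2) 0)).length →
            P ≤ (j - 1) / 2 → j ≠ (pos - 1) / 2 →
            ((l.set pos (l.getD ((pos - 1) / 2) 0)).set ((pos - 1) / 2) x).getD ((j - 1) / 2) 0 ≤
              ((l.set pos (l.getD ((pos - 1) / 2) 0)).set ((pos - 1) / 2) x).getD j 0 := by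
          intro j hj0 hjlen hPj hjpp
          have hjl : j < l.length := by simpa using hjlen
          by_cases hjpos : j = pos
          · subst hjpos
            rw [he2, he3]
            exact le_of_lt hlt
          · by_cases hpar : (j - 1) / 2 = pos
            · rw [hpar, he3, he1 j hjpp hjpos]
              exact hG hPp j hj0 hjl hpar
            · by_cases hsib : (j - 1) / 2 = (pos - 1) / 2
              · rw [hsib, he2, he1 j hjpp hjpos]
                have := hinv j hj0 hjl (by omega) hjpos
                rw [hsib, hf1 _ (by omega), hf1 _ hjpos] at this
                exact le_trans (le_of_lt hlt) this
              · rw [he1 _ hsib hpar, he1 j hjpp hjpos]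
                have := hinv j hj0 hjl hPj hjpos
                rw [hf1 _ hpar, hf1 _ hjpos] at this
                exact this
        have hG2 : P < (pos - 1) / 2 → ∀ c : Nat, 0 < c → c < (l.set pos (l.getD ((pos - 1) / 2) 0)).length →
            (c - 1) / 2 = (pos - 1) / 2 →
            (l.set pos (l.getD ((pos - 1) / 2) 0)).getD (((pos - 1) / 2 - 1) / 2) 0 ≤
              (l.set pos (l.getD ((pos - 1) / 2) 0)).getD c 0 := by
          intro hPpp c hc0 hclen hcpar
          have hcl : c < l.length := by simpa using hclen
          have hanc2 : P ≤ ((pos - 1) / 2 - 1) / 2 := by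
            cases hanc' with
            | refl => omega
            | step _ _ hA => exact pvAnc_le hA
          have hedge1 : l.getD (((pos - 1) / 2 - 1) / 2) 0 ≤ l.getD ((pos - 1) / 2) 0 := by
            have := hinv ((pos - 1) / 2) (by omega) hpplen (by exact hanc2) (by omega)
            rw [hf1 _ (by omega), hf1 _ (by omega)] at this
            exact this
          have hl2 : (l.set pos (l.getD ((pos - 1) / 2) 0)).getD (((pos - 1) / 2 - 1) / 2) 0 =
              l.getD (((pos - 1) / 2 - 1) / 2) 0 := pv_getD_set_ne _ _ _ _ (by omega)
          rw [hl2]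
          by_cases hcpos : c = pos
          · subst hcpos
            rw [pv_getD_set_self l c _ hpos]
            exact hedge1
          · rw [pv_getD_set_ne _ _ _ _ (Ne.symm hcpos)]
            have hedge2 : l.getD ((pos - 1) / 2) 0 ≤ l.getD c 0 := by
              have := hinv c hc0 hcl (by omega) hcpos
              rw [hcpar] at this
              rw [hf1 _ (by omega), hf1 _ hcpos] at this
              exact this
            exact le_trans hedge1 hedge2
        obtain ⟨hperm, hheap⟩ := ih (l.set pos (l.getD ((pos - 1) / 2) 0)) P ((pos - 1) / 2) x
          (by omega) (by simpa using hpplen) hanc' hinv2 hG2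
        refine ⟨hperm.trans ?_, hheap⟩
        exact pv_set_swap_perm l pos ((pos - 1) / 2) x hpos hpplen (by omega)
      · rw [if_neg hlt]
        refine ⟨List.Perm.refl _, ?_⟩
        intro j hj0 hjlen hPj
        have hjl : j < l.length := by simpa using hjlen
        by_cases hjpos : j = pos
        · subst hjpos
          rw [hf1 _ (by omega), pv_getD_set_self l j x hpos]
          exact not_lt.mp hlt
        · exact hinv j hj0 hjl hPj hjpos
    · rw [if_neg hPp]
      have hPeq : pos = P := by have := pvAnc_le hanc; omega
      refine ⟨List.Perm.refl _, ?_⟩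
      intro j hj0 hjlen hPj
      have hjl : j < l.length := by simpa using hjlen
      by_cases hjpos : j = pos
      · exfalso; omega
      · exact hinv j hj0 hjl hPj hjpos

theorem pvSiftdown_spec (l : List Int) (P pos : Nat) (x : Int)
    (hpos : pos < l.length) (hanc : pvAnc P pos)
    (hinv : ∀ j : Nat, 0 < j → j < l.length → P ≤ (j - 1) / 2 → j ≠ pos →
      (l.set pos x).getD ((j - 1) / 2) 0 ≤ (l.set pos x).getD j 0)
    (hG : P < pos → ∀ c : Nat, 0 < c → c < l.length → (c - 1) / 2 = pos →
      l.getD ((pos - 1) / 2) 0 ≤ l.getD c 0) :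
    (pvSiftdown l P pos x).Perm (l.set pos x) ∧ pvHeapFrom (pvSiftdown l P pos x) P :=
  pvSiftdownGo_spec pos l P pos x (le_refl _) hpos hanc hinv hG

theorem pvSiftupGo_spec : ∀ (fuel : Nat) (heap : List Int) (endpos P pos : Nat) (x : Int),
    endpos - pos ≤ fuel → heap.length = endpos → pos < endpos → pvAnc P pos →
    (∀ j : Nat, 0 < j → j < endpos → P ≤ (j - 1) / 2 → (j - 1) / 2 ≠ pos → j ≠ pos →
      heap.getD ((j - 1) / 2) 0 ≤ heap.getD j 0) →
    (P < pos → ∀ c : Nat, 0 < c → c < endpos → (c - 1) / 2 = pos →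
      heap.getD ((pos - 1) / 2) 0 ≤ heap.getD c 0) →
    (pvSiftupGo fuel heap endpos P pos x).Perm (heap.set pos x) ∧
      pvHeapFrom (pvSiftupGo fuel heap endpos P pos x) P := by
  intro fuel
  induction fuel with
  | zero =>
    intro heap endpos P pos x hk hn hpos hanc hH1 hH2
    exfalso
    omega
  | succ f ih =>
    intro heap endpos P pos x hk hn hpos hanc hH1 hH2
    have hposl : pos < heap.length := by omega
    simp only [pvSiftupGo]
    by_cases h1 : 2 * pos + 1 < endpos
    · rw [if_pos h1]
      have key : ∀ c : Nat, pos < c → c < endpos → (c - 1) / 2 = pos →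
          (∀ j : Nat, 0 < j → j < endpos → (j - 1) / 2 = pos → j ≠ c →
            heap.getD c 0 ≤ heap.getD j 0) →
          (pvSiftupGo f (heap.set pos (heap.getD c 0)) endpos P c x).Perm (heap.set pos x) ∧
            pvHeapFrom (pvSiftupGo f (heap.set pos (heap.getD c 0)) endpos P c x) P := by
        intro c hposc hcend hcpar hmin
        have hH1' : ∀ j : Nat, 0 < j → j < endpos → P ≤ (j - 1) / 2 → (j - 1) / 2 ≠ c → j ≠ c →
            (heap.set pos (heap.getD c 0)).getD ((j - 1) / 2) 0 ≤
              (heap.set pos (heap.getD c 0)).getD j 0 := by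
          intro j hj0 hjend hPj hjc1 hjc2
          by_cases hjpos : j = pos
          · subst hjpos
            rw [pv_getD_set_ne _ _ _ _ (by omega), pv_getD_set_self _ _ _ hposl]
            exact hH2 (by omega) c (by omega) hcend hcpar
          · by_cases hpar : (j - 1) / 2 = pos
            · rw [hpar, pv_getD_set_self _ _ _ hposl, pv_getD_set_ne _ _ _ _ (Ne.symm hjpos)]
              exact hmin j hj0 hjend hpar hjc2
            · rw [pv_getD_set_ne _ _ _ _ (Ne.symm hpar), pv_getD_set_ne _ _ _ _ (Ne.symm hjpos)]
              exact hH1 j hj0 hjend hPj hpar hjpos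
        have hH2' : P < c → ∀ d : Nat, 0 < d → d < endpos → (d - 1) / 2 = c →
            (heap.set pos (heap.getD c 0)).getD ((c - 1) / 2) 0 ≤
              (heap.set pos (heap.getD c 0)).getD d 0 := by
          intro _ d hd0 hdend hdpar
          have hdpos : d ≠ pos := by omega
          rw [hcpar, pv_getD_set_self _ _ _ hposl, pv_getD_set_ne _ _ _ _ (Ne.symm hdpos)]
          have := hH1 d hd0 hdend (by omega) (by omega) hdpos
          rw [hdpar] at this
          exact this
        obtain ⟨hperm, hheap⟩ := ih (heap.set pos (heap.getD c 0))
          endpos P c x (by omega) (by simpa using hn) hcend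
          (pvAnc.step P c (by have := pvAnc_le hanc; omega) (by rw [hcpar]; exact hanc))
          hH1' hH2'
        refine ⟨hperm.trans ?_, hheap⟩
        exact pv_set_swap_perm heap pos c x hposl (by omega) (by omega)
      by_cases hcond : 2 * pos + 1 + 1 < endpos ∧
          ¬ (heap.getD (2 * pos + 1) 0 < heap.getD (2 * pos + 1 + 1) 0)
      · rw [if_pos hcond]
        refine key (2 * pos + 1 + 1) (by omega) hcond.1 (by omega) ?_
        intro j hj0 hjend hjpar hjne
        have hj : j = 2 * pos + 1 := by omega
        subst hj
        exact not_lt.mp hcond.2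
      · rw [if_neg hcond]
        refine key (2 * pos + 1) (by omega) h1 (by omega) ?_
        intro j hj0 hjend hjpar hjne
        have hj : j = 2 * pos + 1 + 1 := by omega
        subst hj
        by_contra hnl
        exact hcond ⟨by omega, by omega⟩
    · rw [if_neg h1]
      have hinv' : ∀ j : Nat, 0 < j → j < (heap.set pos x).length → P ≤ (j - 1) / 2 → j ≠ pos →
          ((heap.set pos x).set pos x).getD ((j - 1) / 2) 0 ≤
            ((heap.set pos x).set pos x).getD j 0 := by
        simp only [List.set_set]
        intro j hj0 hjlen hPj hjpos
        have hjend : j < endpos := by simpa [hn] using hjlen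
        have hpar : (j - 1) / 2 ≠ pos := by omega
        rw [pv_getD_set_ne _ _ _ _ (Ne.symm hpar), pv_getD_set_ne _ _ _ _ (Ne.symm hjpos)]
        exact hH1 j hj0 hjend hPj hpar hjpos
      have hG' : P < pos → ∀ c : Nat, 0 < c → c < (heap.set pos x).length → (c - 1) / 2 = pos →
          (heap.set pos x).getD ((pos - 1) / 2) 0 ≤ (heap.set pos x).getD c 0 := by
        intro _ c hc0 hclen hcpar
        exfalso
        have : c < endpos := by simpa [hn] using hclen
        omega
      obtain ⟨hperm, hheap⟩ := pvSiftdown_spec (heap.set pos x) P pos x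
        (by simpa using hposl) hanc hinv' hG'
      rw [List.set_set] at hperm
      exact ⟨hperm, hheap⟩

theorem pvSiftup_spec (heap : List Int) (pos : Nat) (hpos : pos < heap.length)
    (hh : pvHeapFrom heap (pos + 1)) :
    (pvSiftup heap pos).Perm heap ∧ pvHeapFrom (pvSiftup heap pos) pos := by
  unfold pvSiftup
  obtain ⟨hperm, hheap⟩ := pvSiftupGo_spec heap.length heap heap.length pos pos
    (heap.getD pos 0) (by omega) rfl hpos (pvAnc_self pos)
    (fun j hj0 hjl hPj hne _ => hh j hj0 hjl (by omega))
    (fun hlt => absurd hlt (lt_irrefl pos))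
  rw [pv_set_getD_self heap pos hpos] at hperm
  exact ⟨hperm, hheap⟩

theorem pvHeapifyGo_spec : ∀ (i : Nat) (heap : List Int), i ≤ heap.length → pvHeapFrom heap i →
    (pvHeapifyGo heap i).Perm heap ∧ pvHeapFrom (pvHeapifyGo heap i) 0 := by
  intro i
  induction i with
  | zero => intro heap _ hh; exact ⟨List.Perm.refl _, hh⟩
  | succ i ih =>
    intro heap hle hh
    have hilt : i < heap.length := by omega
    obtain ⟨hp, hhf⟩ := pvSiftup_spec heap i hilt hh
    have hlen : (pvSiftup heap i).length = heap.length := pvSiftup_length heap i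
    obtain ⟨hp2, hh2⟩ := ih (pvSiftup heap i) (by omega) hhf
    exact ⟨hp2.trans hp, hh2⟩

theorem pvHeapify_spec (heap : List Int) :
    (pvHeapify heap).Perm heap ∧ pvHeapFrom (pvHeapify heap) 0 := by
  unfold pvHeapify
  refine pvHeapifyGo_spec (heap.length / 2) heap (Nat.div_le_self _ _) ?_
  intro j hj0 hjl hge
  exfalso
  omega

theorem pvHeappop_spec (heap : List Int) (hne : heap ≠ []) (hh : pvHeapFrom heap 0) :
    (pvHeappop heap).1 = heap.getD 0 0 ∧
      ((pvHeappop heap).1 :: (pvHeappop heap).2).Perm heap ∧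
      pvHeapFrom (pvHeappop heap).2 0 := by
  obtain ⟨h0, t, rfl⟩ := List.exists_cons_of_ne_nil hne
  cases t with
  | nil =>
    refine ⟨rfl, List.Perm.refl _, ?_⟩
    intro j hj0 hjl
    have hz : (pvHeappop [h0]).2.length = 0 := rfl
    omega
  | cons b u =>
    have hpop : pvHeappop (h0 :: b :: u) =
        (h0, pvSiftup ((b :: u).getLastD h0 :: (b :: u).dropLast) 0) := rfl
    rw [hpop]
    have hlen1 : ((b :: u).getLastD h0 :: (b :: u).dropLast).length = u.length + 1 := by simp
    have hhf1 : pvHeapFrom ((b :: u).getLastD h0 :: (b :: u).dropLast) 1 := by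
      intro j hj0 hjl hge
      rw [hlen1] at hjl
      have hj3 : 3 ≤ j := by omega
      have hgd : ∀ m : Nat, 1 ≤ m → m < u.length + 1 →
          ((b :: u).getLastD h0 :: (b :: u).dropLast).getD m 0 = (h0 :: b :: u).getD m 0 := by
        intro m hm1 hm2
        obtain ⟨m', rfl⟩ : ∃ m', m = m' + 1 := ⟨m - 1, by omega⟩
        have hm' : m' < (b :: u).dropLast.length := by simpa using by omega
        rw [List.getD_cons_succ, List.getD_cons_succ, List.getD_eq_getElem _ 0 hm',
          List.getElem_dropLast, List.getD_eq_getElem _ 0 (show m' < (b :: u).length by simp; omega)]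
      rw [hgd _ (by omega) (by omega), hgd _ (by omega) (by omega)]
      exact hh j hj0 (by simp; omega) (Nat.zero_le _)
    obtain ⟨hperm, hheap⟩ := pvSiftup_spec ((b :: u).getLastD h0 :: (b :: u).dropLast) 0
      (by rw [hlen1]; omega) hhf1
    refine ⟨rfl, ?_, hheap⟩
    refine (List.Perm.cons h0 hperm).trans ?_
    refine List.Perm.cons h0 ?_
    have hb : (b :: u).dropLast ++ [(b :: u).getLastD h0] = b :: u :=
      pv_dropLast_append_getLastD (b :: u) h0 (by simp)
    have hstep : ((b :: u).getLastD h0 :: (b :: u).dropLast).Perm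
        ((b :: u).dropLast ++ [(b :: u).getLastD h0]) :=
      (List.perm_append_singleton _ _).symm
    refine hstep.trans ?_
    rw [hb]

theorem pvHeappush_spec (heap : List Int) (x : Int) (hh : pvHeapFrom heap 0) :
    (pvHeappush heap x).Perm (x :: heap) ∧ pvHeapFrom (pvHeappush heap x) 0 := by
  unfold pvHeappush
  have hlen : heap.length < (heap ++ [x]).length := by simp
  have hset : (heap ++ [x]).set heap.length x = heap ++ [x] := pv_set_append_length heap x x
  have hinv' : ∀ j : Nat, 0 < j → j < (heap ++ [x]).length → 0 ≤ (j - 1) / 2 → j ≠ heap.length →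
      ((heap ++ [x]).set heap.length x).getD ((j - 1) / 2) 0 ≤
        ((heap ++ [x]).set heap.length x).getD j 0 := by
    rw [hset]
    intro j hj0 hjl hge hjn
    have hjlen : j < heap.length := by simp at hjl; omega
    rw [List.getD_append _ _ _ _ (by omega), List.getD_append _ _ _ _ hjlen]
    exact hh j hj0 hjlen (Nat.zero_le _)
  have hG' : 0 < heap.length → ∀ c : Nat, 0 < c → c < (heap ++ [x]).length →
      (c - 1) / 2 = heap.length →
      (heap ++ [x]).getD ((heap.length - 1) / 2) 0 ≤ (heap ++ [x]).getD c 0 := by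
    intro hl c hc0 hcl hcp
    exfalso
    simp at hcl
    omega
  obtain ⟨hperm, hheap⟩ := pvSiftdown_spec (heap ++ [x]) 0 heap.length x hlen
    (pvAnc_zero _) hinv' hG'
  rw [hset] at hperm
  exact ⟨hperm.trans (List.perm_append_singleton _ _), hheap⟩

-- a heap that is a permutation of a sorted list a :: t has a at its root
theorem pv_heap_head (heap : List Int) (a : Int) (t : List Int)
    (hh : pvHeapFrom heap 0) (hp : heap.Perm (a :: t))
    (hs : (a :: t).Pairwise (· ≤ ·)) : heap.getD 0 0 = a := by
  have hlen : 0 < heap.length := by rw [hp.length_eq]; simp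
  have h0mem : heap.getD 0 0 ∈ heap := by
    rw [List.getD_eq_getElem heap 0 hlen]; exact List.getElem_mem hlen
  have h0mem' : heap.getD 0 0 ∈ a :: t := hp.mem_iff.mp h0mem
  have hle1 : a ≤ heap.getD 0 0 := by
    rcases List.mem_cons.mp h0mem' with h | h
    · exact le_of_eq h.symm
    · exact (List.pairwise_cons.mp hs).1 _ h
  have hamem : a ∈ heap := hp.mem_iff.mpr (List.mem_cons_self ..)
  obtain ⟨i, hi, hieq⟩ := List.mem_iff_getElem.mp hamem
  have hroot := pvHeapFrom_root_le heap hh i hi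
  rw [List.getD_eq_getElem heap 0 hi, hieq] at hroot
  exact le_antisymm hroot hle1

theorem pvInsertSorted_perm (xs : List Int) (v : Int) :
    (pvInsertSorted xs v).Perm (v :: xs) := by
  induction xs with
  | nil => simp [pvInsertSorted]
  | cons x t ih =>
    simp only [pvInsertSorted]
    split_ifs with h
    · exact (List.Perm.cons x ih).trans (List.Perm.swap v x t)
    · exact List.Perm.refl _

theorem pvInsertSorted_mem (xs : List Int) (v y : Int) :
    y ∈ pvInsertSorted xs v ↔ y = v ∨ y ∈ xs :=
  (pvInsertSorted_perm xs v).mem_iff.trans (by simp)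

theorem pvInsertSorted_pairwise (xs : List Int) (v : Int)
    (h : xs.Pairwise (· ≤ ·)) : (pvInsertSorted xs v).Pairwise (· ≤ ·) := by
  induction xs with
  | nil => simp [pvInsertSorted]
  | cons x t ih =>
    obtain ⟨hx, ht⟩ := List.pairwise_cons.mp h
    simp only [pvInsertSorted]
    split_ifs with hxv
    · refine List.pairwise_cons.mpr ⟨?_, ih ht⟩
      intro y hy
      rcases (pvInsertSorted_mem t v y).mp hy with rfl | hy'
      · exact hxv
      · exact hx y hy'
    · refine List.pairwise_cons.mpr ⟨?_, h⟩
      intro y hy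
      rcases List.mem_cons.mp hy with rfl | hy'
      · omega
      · exact le_trans (by omega) (hx y hy')

theorem pvLoop_eq : ∀ (fuel : Nat) (heap s : List Int) (K answer : Int),
    heap.length ≤ fuel → pvHeapFrom heap 0 → s.Pairwise (· ≤ ·) → heap.Perm s →
    pvLoopAGo fuel heap K answer = pvLoopBGo fuel s K answer := by
  intro fuel
  induction fuel with
  | zero => intro heap s K answer _ _ _ _; rfl
  | succ f ih =>
    intro heap s K answer hlen hheap hsort hperm
    cases s with
    | nil =>
      have hnil : heap = [] := List.Perm.eq_nil hperm
      subst hnil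
      simp [pvLoopAGo, pvLoopBGo]
    | cons a t =>
      have hne : heap ≠ [] := by
        intro h
        subst h
        have := hperm.length_eq
        simp at this
      have hhead : heap.getD 0 0 = a := pv_heap_head heap a t hheap hperm hsort
      have hlens : heap.length = t.length + 1 := by simpa using hperm.length_eq
      simp only [pvLoopAGo, pvLoopBGo]
      rw [if_pos hne, hhead]
      by_cases hK : a < K
      · rw [if_pos hK, if_pos hK]
        cases t with
        | nil =>
          have h1 : (heap.length == 1) = true := by simp [hlens]
          rw [h1, if_pos rfl]
        | cons b t2 =>
          have h1 : (heap.length == 1) = false := by simp [hlens]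
          rw [h1]
          simp only [Bool.false_eq_true, if_false]
          obtain ⟨hp1a, hp1perm, hp1heap⟩ := pvHeappop_spec heap hne hheap
          rw [hp1a, hhead] at hp1perm
          have hperm1 : (pvHeappop heap).2.Perm (b :: t2) := (hp1perm.trans hperm).cons_inv
          have hne1 : (pvHeappop heap).2 ≠ [] := by
            intro h
            have := hperm1.length_eq
            rw [h] at this
            simp at this
          have hsort1 : (b :: t2).Pairwise (· ≤ ·) := (List.pairwise_cons.mp hsort).2
          have hhead1 : (pvHeappop heap).2.getD 0 0 = b :=
            pv_heap_head _ b t2 hp1heap hperm1 hsort1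
          obtain ⟨hp2a, hp2perm, hp2heap⟩ := pvHeappop_spec (pvHeappop heap).2 hne1 hp1heap
          rw [hp2a, hhead1] at hp2perm
          have hperm2 : (pvHeappop (pvHeappop heap).2).2.Perm t2 :=
            (hp2perm.trans hperm1).cons_inv
          obtain ⟨hpushperm, hpushheap⟩ :=
            pvHeappush_spec (pvHeappop (pvHeappop heap).2).2 (a + b * 2) hp2heap
          rw [hp1a, hhead, hp2a, hhead1]
          have hlens2 : heap.length = t2.length + 2 := by simpa using hperm.length_eq
          refine ih _ _ K (answer + 1) ?_ ?_ ?_ ?_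
          · rw [pvHeappush_length, pvHeappop_length, pvHeappop_length]
            omega
          · exact hpushheap
          · exact pvInsertSorted_pairwise t2 _ (List.pairwise_cons.mp hsort1).2
          · refine hpushperm.trans ?_
            have h2 : a + b * 2 = a + 2 * b := by ring
            rw [h2]
            exact (List.Perm.cons _ hperm2).trans (pvInsertSorted_perm t2 (a + 2 * b)).symm
      · rw [if_neg hK, if_neg hK]

-- ===== VERDICT (by name: the statement is the Claim_ definition above) =====
theorem solution_spec : Claim_equal_solution := by
  intro scoville K _hdom
  unfold Spec_solution solution solution_alt
  obtain ⟨hperm, hheap⟩ := pvHeapify_spec scoville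
  have hlenB : (PySem.List.sorted scoville (fun x : Int => x) false).length =
      (pvHeapify scoville).length := by
    rw [(PySem.List.sorted_perm (xs := scoville) (key := fun x : Int => x) (rev := false)).length_eq,
      hperm.length_eq]
  rw [hlenB]
  refine pvLoop_eq (pvHeapify scoville).length _ _ K 0 (le_refl _) hheap ?_ ?_
  · have := PySem.List.sorted_pairwise (xs := scoville) (key := fun x : Int => x)
    simpa using this
  · exact hperm.trans (PySem.List.sorted_perm (xs := scoville) (key := fun x : Int => x) (rev := false)).symm
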